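-- pv_equiv track=rewrite | github.com/FernandoMV1/University | MOQ exam.py | verifierLignes
-- ===== SOURCE A (Python) =====
-- def verifierLignes(M):
--     l = [0 for _ in range(len(M))]
--     for i in range(len(M)):
--         for j in range(len(M[0])):
--             l[i] += M[i][j]
--     for i in range(len(l)):
--         for j in range(len(l)):
--             if i != j and l[i] == l[j]:
--                 return False
--     return True
-- ===== SOURCE B (Python) =====
-- def verifierLignes(M):
--     if not M:
--         return True
--     w = len(M[0])
--     sums = sorted(sum(row[:w]) for row in M)
--     for x, y in zip(sums, sums[1:]):
--         if x == y:
--             return False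
--     return True
-- ===== Notes on version B (the rewrite author's own statement) =====
-- stated objective: faster
-- what changed: B computes each row's sum (over the first len(M[0]) columns, as A does) in one pass, sorts the sums once, and detects duplicates by a single adjacent-pair scan instead of A's O(n^2) all-pairs comparison.
import Mathlib
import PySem

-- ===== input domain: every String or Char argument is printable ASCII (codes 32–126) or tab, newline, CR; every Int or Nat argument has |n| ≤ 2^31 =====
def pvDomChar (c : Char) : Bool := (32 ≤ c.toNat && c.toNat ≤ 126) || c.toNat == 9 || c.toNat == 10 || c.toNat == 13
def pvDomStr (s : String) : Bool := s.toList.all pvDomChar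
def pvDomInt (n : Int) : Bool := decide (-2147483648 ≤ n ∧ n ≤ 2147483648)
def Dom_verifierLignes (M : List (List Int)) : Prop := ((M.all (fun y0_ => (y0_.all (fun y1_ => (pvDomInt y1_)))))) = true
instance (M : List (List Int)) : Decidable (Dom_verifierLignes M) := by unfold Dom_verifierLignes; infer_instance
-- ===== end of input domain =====

-- B replaces A's O(n^2) all-pairs duplicate check on row sums by sort-then-adjacent-scan.
-- A mutates nothing observable; equivalence is about the return value.

-- ===== PORT A =====
-- Literal port: build l of zeros, nested index loops accumulating l[i] += M[i][j]
-- (j ranges over len(M[0])), then the all-pairs loop with early return modelled by `any`.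
-- Indexing uses getD; inside Pre_ every index is in range, so this matches Python exactly.
def verifierLignes (M : List (List Int)) : Bool :=
  let l0 : List Int := (List.range M.length).map (fun _ => (0 : Int))
  let l := (List.range M.length).foldl (fun l i =>
      (List.range (M.headD []).length).foldl (fun l j =>
        l.set i ((l.getD i 0) + ((M.getD i []).getD j 0))) l) l0
  !((List.range l.length).any (fun i =>
      (List.range l.length).any (fun j =>
        decide (i ≠ j) && decide (l.getD i 0 = l.getD j 0))))

-- ===== PORT B =====
-- B-side helper: the `for x, y in zip(sums, sums[1:])` early-return scan.
def adjDistinct : List Int → Bool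
  | x :: y :: t => if x = y then false else adjDistinct (y :: t)
  | _ => true

def verifierLignes_alt (M : List (List Int)) : Bool :=
  match M with
  | [] => true
  | r0 :: _ =>
    let w : Int := (r0.length : Int)
    let sums := M.map (fun row => (PySem.List.slice row none (some w)).sum)
    adjDistinct (PySem.List.sorted sums (fun x => x) false)

-- ===== PRECONDITION & SPEC =====
-- A raises IndexError when some row is shorter than the first row (it reads M[i][j]
-- for all j < len(M[0])); exactly those inputs are excluded.
def Pre_verifierLignes (M : List (List Int)) : Prop :=
  ∀ row ∈ M, (M.headD []).length ≤ row.length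
instance (M : List (List Int)) : Decidable (Pre_verifierLignes M) := by
  unfold Pre_verifierLignes; infer_instance
def pvWitness_verifierLignes : List (List Int) := [[1, 2], [3, 4]]

def Spec_verifierLignes (M : List (List Int)) (out : Bool) : Prop := out = verifierLignes_alt M
instance (M : List (List Int)) (out : Bool) : Decidable (Spec_verifierLignes M out) := by
  unfold Spec_verifierLignes; infer_instance

-- ===== CLAIM (what is proved, stated in full; the proofs are below) =====
def Claim_equal_verifierLignes : Prop :=
  ∀ (M : List (List Int)), Dom_verifierLignes M → Pre_verifierLignes M →
    Spec_verifierLignes M (verifierLignes M)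

-- ===== LEMMAS AND PROOFS =====

-- inner loop of A: accumulating M[i][j] over j < w into slot i
theorem innerFold (r : List Int) (w : Nat) (i : Nat) (l : List Int) (hi : i < l.length) :
    (List.range w).foldl (fun l j => l.set i ((l.getD i 0) + (r.getD j 0))) l
      = l.set i ((l.getD i 0) + ((List.range w).map (fun j => r.getD j 0)).sum) := by
  induction w generalizing l with
  | zero => simp [List.getD_eq_getElem?_getD, List.getElem?_eq_getElem hi]
  | succ w ih =>
      rw [List.range_succ, List.foldl_append, ih l hi]
      simp only [List.foldl_cons, List.foldl_nil, List.map_append, List.map_cons, List.map_nil,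
        List.sum_append, List.sum_cons, List.sum_nil]
      rw [List.set_set]
      congr 1
      have : (l.set i (l.getD i 0 + ((List.range w).map (fun j => r.getD j 0)).sum)).getD i 0
          = l.getD i 0 + ((List.range w).map (fun j => r.getD j 0)).sum := by
        simp [List.getD_eq_getElem?_getD, List.getElem?_set_self, hi]
      rw [this]; ring

theorem mapRangeGetD (r : List Int) (w : Nat) (hw : w ≤ r.length) :
    (List.range w).map (fun j => r.getD j 0) = r.take w := by
  induction w with
  | zero => simp
  | succ w ih =>
      have hw' : w ≤ r.length := Nat.le_of_succ_le hw
      rw [List.range_succ, List.map_append, ih hw', List.take_succ]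
      simp [List.getD_eq_getElem?_getD, List.getElem?_eq_getElem (Nat.lt_of_succ_le hw)]

-- outer loop of A: after processing indices < k, slot i holds g i for i < k, else 0
theorem outerFold (g : Nat → Int) (n k : Nat) (hk : k ≤ n) :
    (List.range k).foldl (fun l i => l.set i ((l.getD i 0) + g i)) ((List.range n).map (fun _ => (0 : Int)))
      = (List.range n).map (fun i => if i < k then g i else 0) := by
  induction k with
  | zero => simp
  | succ k ih =>
      have hk' : k ≤ n := Nat.le_of_succ_le hk
      have hkn : k < n := Nat.lt_of_succ_le hk
      rw [List.range_succ, List.foldl_append, ih hk']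
      simp only [List.foldl_cons, List.foldl_nil]
      have hget : (((List.range n).map (fun i => if i < k then g i else 0)).getD k 0) = 0 := by
        simp [List.getD_eq_getElem?_getD, List.getElem?_map, List.getElem?_range, hkn]
      rw [hget, zero_add]
      apply List.ext_getElem
      · simp
      · intro i h1 h2
        simp only [List.getElem_set, List.getElem_map, List.getElem_range,
          List.length_map, List.length_range] at *
        by_cases h : k = i
        · subst h; simp
        · simp only [h, if_false]
          have hiff : i < k ↔ i < k + 1 := by omega
          simp only [hiff]

-- combining: A's accumulator equals the list of (truncated) row sums
theorem lEq (M : List (List Int)) (hpre : Pre_verifierLignes M) :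
    (List.range M.length).foldl (fun l i =>
        (List.range (M.headD []).length).foldl (fun l j =>
          l.set i ((l.getD i 0) + ((M.getD i []).getD j 0))) l)
      ((List.range M.length).map (fun _ => (0 : Int)))
      = M.map (fun row => (row.take (M.headD []).length).sum) := by
  set w := (M.headD []).length with hw
  have hstep : ∀ (l : List Int) (i : Nat), i < l.length →
      (List.range w).foldl (fun l j => l.set i ((l.getD i 0) + ((M.getD i []).getD j 0))) l
        = l.set i ((l.getD i 0) + ((List.range w).map (fun j => (M.getD i []).getD j 0)).sum) :=
    fun l i hi => innerFold (M.getD i []) w i l hi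
  -- the outer fold acts only through set/getD on lists of length M.length
  have hlen : ∀ (l : List Int) (i : Nat),
      ((List.range w).foldl (fun l j => l.set i ((l.getD i 0) + ((M.getD i []).getD j 0))) l).length
        = l.length := by
    intro l i
    induction w generalizing l with
    | zero => rfl
    | succ w ih =>
        rw [List.range_succ, List.foldl_append]
        simp only [List.foldl_cons, List.foldl_nil, List.length_set]
        exact ih l
  -- rewrite each outer step via innerFold, by `foldl_congr` on membership
  have key : (List.range M.length).foldl (fun l i =>
        (List.range w).foldl (fun l j =>
          l.set i ((l.getD i 0) + ((M.getD i []).getD j 0))) l)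
      ((List.range M.length).map (fun _ => (0 : Int)))
      = (List.range M.length).foldl
        (fun l i => l.set i ((l.getD i 0) + ((List.range w).map (fun j => (M.getD i []).getD j 0)).sum))
        ((List.range M.length).map (fun _ => (0 : Int))) := by
    -- both folds preserve length = M.length; prove equality of partial folds over range k
    suffices h : ∀ k, k ≤ M.length →
        (List.range k).foldl (fun l i =>
            (List.range w).foldl (fun l j =>
              l.set i ((l.getD i 0) + ((M.getD i []).getD j 0))) l)
          ((List.range M.length).map (fun _ => (0 : Int)))
        = (List.range k).foldl
            (fun l i => l.set i ((l.getD i 0) + ((List.range w).map (fun j => (M.getD i []).getD j 0)).sum))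
            ((List.range M.length).map (fun _ => (0 : Int))) ∧
        ((List.range k).foldl (fun l i =>
            (List.range w).foldl (fun l j =>
              l.set i ((l.getD i 0) + ((M.getD i []).getD j 0))) l)
          ((List.range M.length).map (fun _ => (0 : Int)))).length = M.length by
      exact (h M.length le_rfl).1
    intro k hk
    induction k with
    | zero => simp
    | succ k ih =>
        have hk' : k ≤ M.length := Nat.le_of_succ_le hk
        obtain ⟨heq, hlen'⟩ := ih hk'
        constructor
        · rw [List.range_succ, List.foldl_append, List.foldl_append]
          simp only [List.foldl_cons, List.foldl_nil]
          rw [heq, ← heq, hstep _ k (by rw [hlen']; exact Nat.lt_of_succ_le hk), heq]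
        · rw [List.range_succ, List.foldl_append]
          simp only [List.foldl_cons, List.foldl_nil]
          rw [hlen]; exact hlen'
  rw [key, outerFold _ M.length M.length le_rfl]
  -- now (range n).map (if i < n then g i else 0) = (range n).map g = M.map sums
  have h1 : (List.range M.length).map
        (fun i => if i < M.length then ((List.range w).map (fun j => (M.getD i []).getD j 0)).sum else 0)
      = (List.range M.length).map (fun i => ((List.range w).map (fun j => (M.getD i []).getD j 0)).sum) := by
    apply List.map_congr_left; intro i hi
    simp [List.mem_range.mp hi]
  rw [h1]
  -- map over range = map over M, then truncate via mapRangeGetD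
  clear key hstep hlen h1
  have hrow : ∀ i (hi : i < M.length), w ≤ (M.getD i []).length := by
    intro i hi
    have : M.getD i [] ∈ M := by
      rw [List.getD_eq_getElem?_getD, List.getElem?_eq_getElem hi]
      exact List.getElem_mem hi
    exact hpre _ this
  apply List.ext_getElem
  · simp
  · intro i h1 h2
    simp only [List.getElem_map, List.getElem_range, List.length_map, List.length_range] at *
    rw [mapRangeGetD _ _ (hrow i (by simpa using h1))]
    congr 1
    have hi : i < M.length := by simpa using h1
    simp [List.getD_eq_getElem?_getD, List.getElem?_eq_getElem hi]

-- A's all-pairs check detects exactly non-Nodup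
theorem pairAny (l : List Int) :
    ((List.range l.length).any (fun i =>
        (List.range l.length).any (fun j =>
          decide (i ≠ j) && decide (l.getD i 0 = l.getD j 0)))) = true ↔ ¬ l.Nodup := by
  simp only [List.any_eq_true, List.mem_range, Bool.and_eq_true, decide_eq_true_eq]
  constructor
  · rintro ⟨i, hi, j, hj, hne, heq⟩
    intro hnd
    rw [List.getD_eq_getElem?_getD, List.getD_eq_getElem?_getD,
      List.getElem?_eq_getElem hi, List.getElem?_eq_getElem hj] at heq
    have := (List.nodup_iff_injective_getElem.mp hnd)
      (a₁ := ⟨i, hi⟩) (a₂ := ⟨j, hj⟩) heq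
    exact hne (by simpa using this)
  · intro hnd
    rw [List.nodup_iff_injective_getElem] at hnd
    simp only [Function.Injective, not_forall] at hnd
    obtain ⟨⟨i, hi⟩, ⟨j, hj⟩, heq, hne⟩ := hnd
    refine ⟨i, hi, j, hj, by simpa using hne, ?_⟩
    rw [List.getD_eq_getElem?_getD, List.getD_eq_getElem?_getD,
      List.getElem?_eq_getElem hi, List.getElem?_eq_getElem hj]
    simpa using heq

-- B's adjacent scan on a ≤-sorted list detects exactly Nodup
theorem adjDistinct_sorted (s : List Int) (hs : s.Pairwise (· ≤ ·)) :
    adjDistinct s = true ↔ s.Nodup := by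
  induction s with
  | nil => simp [adjDistinct]
  | cons x t ih =>
      cases t with
      | nil => simp [adjDistinct]
      | cons y t =>
          have hs' : (y :: t).Pairwise (· ≤ ·) := hs.tail
          have hxy : x ≤ y := (List.pairwise_cons.mp hs).1 y (by simp)
          have hyt : ∀ z ∈ t, y ≤ z := fun z hz => (List.pairwise_cons.mp hs').1 z hz
          rw [adjDistinct]
          by_cases hxey : x = y
          · subst hxey
            simp
          · simp only [hxey, if_false, ih hs', List.nodup_cons]
            constructor
            · intro hnd
              refine ⟨?_, hnd⟩
              intro hmem
              rcases List.mem_cons.mp hmem with h | h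
              · exact hxey h
              · have : y ≤ x := le_trans (hyt x h) le_rfl
                exact hxey (le_antisymm hxy this)
            · rintro ⟨_, hnd⟩; exact hnd

theorem verifierLignes_eq (M : List (List Int)) (hpre : Pre_verifierLignes M) :
    verifierLignes M = verifierLignes_alt M := by
  cases M with
  | nil => rfl
  | cons r0 t =>
      unfold verifierLignes verifierLignes_alt
      simp only []
      rw [lEq (r0 :: t) hpre]
      set sums := (r0 :: t).map (fun row => (row.take ((r0 :: t).headD []).length).sum) with hsums
      have hslice : (r0 :: t).map (fun row => (PySem.List.slice row none (some ((r0.length : Nat) : Int))).sum)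
          = sums := by
        simp only [hsums, PySem.List.slice_to_natCast]
        rfl
      rw [hslice]
      have hperm : (PySem.List.sorted sums (fun x => x) false).Perm sums :=
        PySem.List.sorted_perm sums (fun x => x) false
      have hpair : (PySem.List.sorted sums (fun x => x) false).Pairwise (· ≤ ·) := by
        have := PySem.List.sorted_pairwise sums (fun x => x)
        simpa using this
      have hA := pairAny sums
      have hB := adjDistinct_sorted _ hpair
      rw [hperm.nodup_iff] at hB
      by_cases hnd : sums.Nodup
      · have hBtrue : adjDistinct (PySem.List.sorted sums (fun x => x) false) = true := hB.mpr hnd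
        have hAfalse : ¬ ((List.range sums.length).any (fun i =>
            (List.range sums.length).any (fun j =>
              decide (i ≠ j) && decide (sums.getD i 0 = sums.getD j 0))) = true) := by
          intro h; exact (hA.mp h) hnd
        simp only [Bool.not_eq_true] at hAfalse
        rw [hAfalse, hBtrue]; rfl
      · have hBfalse : adjDistinct (PySem.List.sorted sums (fun x => x) false) ≠ true := by
          intro h; exact hnd (hB.mp h)
        have hAtrue : (List.range sums.length).any (fun i =>
            (List.range sums.length).any (fun j =>
              decide (i ≠ j) && decide (sums.getD i 0 = sums.getD j 0))) = true := hA.mpr hnd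
        rw [hAtrue]
        simp only [Bool.not_eq_true] at hBfalse
        rw [hBfalse]; rfl

-- ===== VERDICT (by name: the statement is the Claim_ definition above) =====
theorem verifierLignes_spec : Claim_equal_verifierLignes := by
  intro M _ hpre
  unfold Spec_verifierLignes
  exact verifierLignes_eq M hpre
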